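-- pv_equiv track=rewrite | github.com/Waqar53/Redparrot | backend/services/resume_parser.py | _is_section_header
-- ===== SOURCE A (Python) =====
-- EXPERIENCE_HEADERS = [
--     "experience", "work experience", "professional experience", "employment history",
--     "work history", "career history", "professional background",
-- ]
--
-- def _is_section_header(line: str) -> bool:
--     """Check if line is section header"""
--     headers = [
--         *EXPERIENCE_HEADERS,
--         "education", "skills", "projects", "certifications", "awards",
--         "summary", "objective", "contact", "references",
--     ]
--     lower = line.lower().strip()
--     return any(lower == h or lower.startswith(h + ":") for h in headers)
-- ===== SOURCE B (Python) =====
-- _SECTION_HEADERS = frozenset([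
--     "experience", "work experience", "professional experience", "employment history",
--     "work history", "career history", "professional background",
--     "education", "skills", "projects", "certifications", "awards",
--     "summary", "objective", "contact", "references",
-- ])
--
-- def _is_section_header(line: str) -> bool:
--     """Check if line is section header"""
--     lower = line.lower().strip()
--     i = lower.find(':')
--     key = lower if i < 0 else lower[:i]
--     return key in _SECTION_HEADERS
-- ===== Notes on version B (the rewrite author's own statement) =====
-- stated objective: simpler
-- what changed: Replaces the per-header any()/startswith scan with a single extraction of the prefix before the first colon followed by one membership test in a module-level frozenset.
import Mathlib
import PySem

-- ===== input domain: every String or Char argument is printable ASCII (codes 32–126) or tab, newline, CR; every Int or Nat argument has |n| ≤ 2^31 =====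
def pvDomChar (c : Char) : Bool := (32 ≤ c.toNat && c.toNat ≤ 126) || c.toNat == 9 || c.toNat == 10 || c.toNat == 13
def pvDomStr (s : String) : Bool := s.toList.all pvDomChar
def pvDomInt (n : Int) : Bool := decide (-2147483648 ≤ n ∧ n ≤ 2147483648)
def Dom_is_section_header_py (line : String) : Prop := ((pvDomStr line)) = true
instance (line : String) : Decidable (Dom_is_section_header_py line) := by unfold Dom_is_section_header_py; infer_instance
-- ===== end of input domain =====

-- B replaces A's per-header any()/startswith loop by extracting the prefix before the
-- first colon once and testing membership in a precomputed frozenset (objective: simpler).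

-- ===== PORT A =====
-- module-level EXPERIENCE_HEADERS (strings ported as char lists)
def pvExperienceHeaders : List (List Char) :=
  ["experience".toList, "work experience".toList, "professional experience".toList,
   "employment history".toList, "work history".toList, "career history".toList,
   "professional background".toList]

def is_section_header_py (line : String) : Bool :=
  let headers := pvExperienceHeaders ++
    ["education".toList, "skills".toList, "projects".toList, "certifications".toList,
     "awards".toList, "summary".toList, "objective".toList, "contact".toList,
     "references".toList]
  let lower := PySem.Chars.strip (PySem.Chars.lower line.toList)
  headers.any (fun h => lower == h || PySem.Chars.startswith lower (h ++ [':']))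

-- ===== PORT B =====
-- module-level frozenset of all headers
def pvHeaderSet : PySem.Set (List Char) :=
  PySem.Set.ofList
    ["experience".toList, "work experience".toList, "professional experience".toList,
     "employment history".toList, "work history".toList, "career history".toList,
     "professional background".toList,
     "education".toList, "skills".toList, "projects".toList, "certifications".toList,
     "awards".toList, "summary".toList, "objective".toList, "contact".toList,
     "references".toList]

def is_section_header_py_alt (line : String) : Bool :=
  let lower := PySem.Chars.strip (PySem.Chars.lower line.toList)
  let i := PySem.Chars.find lower [':']
  let key := if i < 0 then lower else PySem.Chars.slice lower none (some i)
  PySem.Set.contains pvHeaderSet key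

-- ===== PRECONDITION & SPEC =====
def Spec_is_section_header_py (line : String) (out : Bool) : Prop := out = is_section_header_py_alt line
instance (line : String) (out : Bool) : Decidable (Spec_is_section_header_py line out) := by unfold Spec_is_section_header_py; infer_instance

-- ===== CLAIM (what is proved, stated in full; the proofs are below) =====
def Claim_equal_is_section_header_py : Prop := ∀ (line : String), Dom_is_section_header_py line → Spec_is_section_header_py line (is_section_header_py line)

-- ===== LEMMAS AND PROOFS =====

-- [a] is a prefix of l iff l starts with a
theorem pvSingletonPrefix (a : Char) (l : List Char) : [a] <+: l ↔ l.head? = some a := by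
  cases l with
  | nil => simp
  | cons c t => simp [List.cons_prefix_cons, eq_comm]

-- A's per-header test equals comparing the colon-free header with the take-while-not-colon prefix
theorem pvL2 (h s : List Char) (hh : (':' : Char) ∉ h) :
    (s = h ∨ (h ++ [':']) <+: s) ↔ s.takeWhile (fun c => c != ':') = h := by
  induction h generalizing s with
  | nil =>
    cases s with
    | nil => simp
    | cons c t =>
      simp only [List.nil_append, List.takeWhile_cons]
      rw [pvSingletonPrefix]
      by_cases hc : c = ':' <;> simp [hc]
  | cons a h' ih =>
    have ha : a ≠ ':' := fun e => hh (e ▸ List.mem_cons_self)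
    have hh' : (':' : Char) ∉ h' := fun e => hh (List.mem_cons_of_mem _ e)
    cases s with
    | nil => simp
    | cons c t =>
      by_cases hca : c = a
      · subst hca
        have hcne : (c != ':') = true := by simp [ha]
        simp only [List.cons_append, List.cons_prefix_cons, List.takeWhile_cons,
          hcne, List.cons.injEq, if_true, true_and]
        exact ih t hh' 
      · simp only [List.cons_append, List.cons_prefix_cons, List.cons.injEq, List.takeWhile_cons]
        constructor
        · rintro (⟨e, -⟩ | ⟨e, -⟩)
          · exact absurd e hca
          · exact absurd e.symm hca
        · intro e
          by_cases hc : c = ':'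
          · simp [hc] at e
          · simp [hc] at e
            exact absurd e.1 hca

-- take n = takeWhile when everything before n satisfies p and position n fails it
theorem pvTakeEq (p : Char → Bool) (s : List Char) (n : Nat)
    (h1 : ∀ i, i < n → ∀ (hl : i < s.length), p s[i] = true)
    (hn : n < s.length) (h2 : p s[n] = false) :
    s.take n = s.takeWhile p := by
  induction s generalizing n with
  | nil => simp at hn
  | cons c t ih =>
    cases n with
    | zero => simp_all
    | succ m =>
      have hc : p c = true := h1 0 (Nat.succ_pos m) (by simp)
      simp only [List.take_succ_cons, List.takeWhile_cons, hc, if_true]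
      rw [ih m (fun i hi hl => h1 (i+1) (by omega) (by simpa using Nat.succ_lt_succ hl))
        (by simpa using hn) (by simpa using h2)]

-- B's key computation equals takeWhile (· != ':')
theorem pvL1 (s : List Char) :
    (if PySem.Chars.find s [':'] < 0 then s
     else PySem.Chars.slice s none (some (PySem.Chars.find s [':']))) =
    s.takeWhile (fun c => c != ':') := by
  by_cases hneg : PySem.Chars.find s [':'] < 0
  · rw [if_pos hneg]
    have hnin : ¬ ([':'] <:+: s) := by
      rw [← PySem.Chars.find_nonneg_iff]; omega
    have hmem : (':' : Char) ∉ s := fun hm => hnin ((List.singleton_infix_iff _ _).mpr hm)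
    symm
    exact List.takeWhile_eq_self_iff.mpr (fun a ha => by
      simp only [bne_iff_ne, ne_eq]
      exact fun e => hmem (e ▸ ha))
  · have hneg : 0 ≤ PySem.Chars.find s [':'] := by omega
    have hfind := PySem.Chars.find_spec (s := s) (sub := [':']) hneg
    rw [if_neg (by omega), PySem.Chars.slice_eq_listSlice, PySem.List.slice_to _ hneg]
    set j := (PySem.Chars.find s [':']).toNat with hj
    obtain ⟨hpre, hmin⟩ := hfind
    have hjlt : j < s.length := by
      rcases hpre with ⟨t, ht⟩
      have := congrArg List.length ht
      simp at this
      omega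
    have hgetj : s[j] = ':' := by
      have h := (pvSingletonPrefix ':' (s.drop j)).mp hpre
      rw [List.head?_drop, List.getElem?_eq_getElem hjlt] at h
      simpa using h
    apply pvTakeEq
    · intro i hi hl
      have hni := hmin i hi
      rw [pvSingletonPrefix, List.head?_drop, List.getElem?_eq_getElem hl] at hni
      simp only [bne_iff_ne, ne_eq]
      exact fun e => hni (by rw [e])
    · simp [hgetj]
    · exact hjlt

-- the any-loop over colon-free headers equals membership of the takeWhile prefix
theorem pvAnyEq (s : List Char) (l : List (List Char)) (hl : ∀ h ∈ l, (':' : Char) ∉ h) :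
    (l.any (fun h => s == h || PySem.Chars.startswith s (h ++ [':']))) =
    (l.any (fun h => s.takeWhile (fun c => c != ':') == h)) := by
  induction l with
  | nil => rfl
  | cons h t ih =>
    simp only [List.any_cons]
    rw [ih (fun x hx => hl x (List.mem_cons_of_mem _ hx))]
    congr 1
    have hch := hl h List.mem_cons_self
    have hiff := pvL2 h s hch
    rw [Bool.eq_iff_iff]
    simp only [Bool.or_eq_true, beq_iff_eq, PySem.Chars.startswith_iff]
    exact hiff

-- ===== VERDICT (by name: the statement is the Claim_ definition above) =====
theorem is_section_header_py_spec : Claim_equal_is_section_header_py := by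
  intro line _
  unfold Spec_is_section_header_py is_section_header_py is_section_header_py_alt
  simp only []
  set s := PySem.Chars.strip (PySem.Chars.lower line.toList) with hs
  rw [pvL1]
  rw [pvAnyEq s _ (by decide)]
  rw [Bool.eq_iff_iff]
  simp only [List.any_eq_true, beq_iff_eq, PySem.Set.contains_iff]
  have hset : pvHeaderSet = pvExperienceHeaders ++
    ["education".toList, "skills".toList, "projects".toList, "certifications".toList,
     "awards".toList, "summary".toList, "objective".toList, "contact".toList,
     "references".toList] := by decide
  rw [hset]
  constructor
  · rintro ⟨h, hmem, rfl⟩; exact hmem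
  · intro hmem; exact ⟨_, hmem, rfl⟩
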